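-- pv_equiv track=rewrite | github.com/Abiy-Alemu/Abiy-Alemu | Codeforces/E_Ravenwood_s_Prison.py | is_unique_mapping
-- ===== SOURCE A (Python) =====
-- def is_unique_mapping(n, a):
--     visited = set()
--     for i, num in enumerate(a):
--         new_position = (i + num) % n
--         if new_position in visited:
--             return "NO"
--         visited.add(new_position)
--     return "YES"
-- ===== SOURCE B (Python) =====
-- def is_unique_mapping(n, a):
--     positions = sorted((i + num) % n for i, num in enumerate(a))
--     for prev, cur in zip(positions, positions[1:]):
--         if prev == cur:
--             return "NO"
--     return "YES"
-- ===== Notes on version B (the rewrite author's own statement) =====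
-- stated objective: alternative
-- what changed: Replaces incremental hash-set duplicate detection with sort-then-adjacent-compare over the precomputed position list.
import Mathlib
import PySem

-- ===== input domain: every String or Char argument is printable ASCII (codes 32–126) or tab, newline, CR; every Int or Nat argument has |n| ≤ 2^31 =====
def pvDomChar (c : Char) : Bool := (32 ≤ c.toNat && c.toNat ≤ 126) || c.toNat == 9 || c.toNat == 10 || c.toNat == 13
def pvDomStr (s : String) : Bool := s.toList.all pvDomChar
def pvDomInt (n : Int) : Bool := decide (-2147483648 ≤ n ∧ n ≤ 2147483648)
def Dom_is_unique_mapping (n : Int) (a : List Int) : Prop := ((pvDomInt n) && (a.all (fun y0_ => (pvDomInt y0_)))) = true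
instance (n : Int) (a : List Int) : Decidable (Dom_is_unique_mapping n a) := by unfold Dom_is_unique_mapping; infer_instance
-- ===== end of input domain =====

-- B replaces A's incremental set-membership duplicate check with sort-then-adjacent-compare
-- over the same position list (objective: alternative, same result).


-- ===== PORT A =====
-- the 'for i, num in enumerate(a)' loop with early return, carrying the visited set
def pvLoopA (n : Int) (visited : PySem.Set Int) : List (Int × Int) → String
  | [] => "YES"
  | (i, num) :: rest =>
    let new_position := PySem.Int.mod (i + num) n
    if PySem.Set.contains visited new_position then "NO"
    else pvLoopA n (PySem.Set.add visited new_position) rest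

def is_unique_mapping (n : Int) (a : List Int) : String :=
  pvLoopA n PySem.Set.empty (PySem.List.enumerate a 0)

-- ===== PORT B =====
-- adjacent-equal scan over the sorted position list (the zip of Source B)
def pvScanAdj : List Int → String
  | [] => "YES"
  | [_] => "YES"
  | x :: y :: t => if x = y then "NO" else pvScanAdj (y :: t)

def is_unique_mapping_alt (n : Int) (a : List Int) : String :=
  let positions := PySem.List.sorted
    ((PySem.List.enumerate a 0).map (fun p => PySem.Int.mod (p.1 + p.2) n))
    (fun x => x) false
  pvScanAdj positions

-- ===== PRECONDITION & SPEC =====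
-- Pre_ excludes exactly n = 0 with nonempty a, where the Python '% n' raises ZeroDivisionError.
def Pre_is_unique_mapping (n : Int) (a : List Int) : Prop := n ≠ 0 ∨ a = []
instance (n : Int) (a : List Int) : Decidable (Pre_is_unique_mapping n a) := by
  unfold Pre_is_unique_mapping; infer_instance

def pvWitness_is_unique_mapping : Int × List Int := (3, [0, 1, 2])

def Spec_is_unique_mapping (n : Int) (a : List Int) (out : String) : Prop := out = is_unique_mapping_alt n a
instance (n : Int) (a : List Int) (out : String) : Decidable (Spec_is_unique_mapping n a out) := by unfold Spec_is_unique_mapping; infer_instance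

-- ===== CLAIM (what is proved, stated in full; the proofs are below) =====
def Claim_equal_is_unique_mapping : Prop := ∀ (n : Int) (a : List Int), Dom_is_unique_mapping n a → Pre_is_unique_mapping n a → Spec_is_unique_mapping n a (is_unique_mapping n a)

-- ===== LEMMAS AND PROOFS =====

-- A's loop returns "YES" iff the remaining positions are pairwise distinct and avoid the visited set
theorem pvLoopA_yes (n : Int) (l : List (Int × Int)) (s : PySem.Set Int) :
    pvLoopA n s l = "YES" ↔
      ((l.map (fun p => PySem.Int.mod (p.1 + p.2) n)).Nodup ∧
        ∀ x ∈ l.map (fun p => PySem.Int.mod (p.1 + p.2) n), x ∉ s) := by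
  induction l generalizing s with
  | nil => simp [pvLoopA]
  | cons p rest ih =>
    simp only [pvLoopA, List.map_cons, List.nodup_cons, List.mem_cons]
    by_cases hc : PySem.Set.contains s (PySem.Int.mod (p.1 + p.2) n)
    · rw [if_pos hc]
      have hm : PySem.Int.mod (p.1 + p.2) n ∈ s := (PySem.Set.contains_iff ..).mp hc
      constructor
      · intro h; exact absurd h (by decide)
      · rintro ⟨-, h2⟩; exact absurd hm (h2 _ (Or.inl rfl))
    · rw [if_neg hc, ih]
      have hmem : PySem.Int.mod (p.1 + p.2) n ∉ s := fun h =>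
        hc ((PySem.Set.contains_iff ..).mpr h)
      constructor
      · rintro ⟨h1, h2⟩
        refine ⟨⟨fun hx => ?_, h1⟩, ?_⟩
        · have := h2 _ hx
          rw [PySem.Set.mem_add] at this
          exact this (Or.inr rfl)
        · rintro x (rfl | hx)
          · exact hmem
          · intro hxs
            exact h2 x hx ((PySem.Set.mem_add ..).mpr (Or.inl hxs))
      · rintro ⟨⟨h0, h1⟩, h2⟩
        refine ⟨h1, ?_⟩
        intro x hx hmem'
        rcases (PySem.Set.mem_add ..).mp hmem' with hxs | rfl
        · exact h2 x (Or.inr hx) hxs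
        · exact h0 hx

theorem pvLoopA_cases (n : Int) (l : List (Int × Int)) (s : PySem.Set Int) :
    pvLoopA n s l = "YES" ∨ pvLoopA n s l = "NO" := by
  induction l generalizing s with
  | nil => left; rfl
  | cons p rest ih =>
    simp only [pvLoopA]
    split
    · right; rfl
    · exact ih _

-- on a ≤-sorted list, B's adjacent scan returns "YES" iff the list has no duplicates
theorem pvScanAdj_yes (l : List Int) (hs : l.Pairwise (· ≤ ·)) :
    pvScanAdj l = "YES" ↔ l.Nodup := by
  induction l with
  | nil => simp [pvScanAdj]
  | cons x t ih =>
    cases t with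
    | nil => simp [pvScanAdj]
    | cons y t' =>
      rw [List.pairwise_cons] at hs
      by_cases hxy : x = y
      · subst hxy
        simp [pvScanAdj]
      · have hnx : x ∉ y :: t' := by
          intro hxmem
          rcases List.mem_cons.mp hxmem with rfl | hx
          · exact hxy rfl
          · have h1 : x ≤ y := hs.1 y (by simp)
            have h2 : y ≤ x := (List.pairwise_cons.mp hs.2).1 x hx
            exact hxy (le_antisymm h1 h2)
        simp only [pvScanAdj, if_neg hxy, ih hs.2, List.nodup_cons]
        simp [hnx]

theorem pvScanAdj_cases (l : List Int) : pvScanAdj l = "YES" ∨ pvScanAdj l = "NO" := by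
  induction l with
  | nil => left; rfl
  | cons x t ih =>
    cases t with
    | nil => left; rfl
    | cons y t' =>
      simp only [pvScanAdj]
      split
      · right; rfl
      · simpa [pvScanAdj] using ih

-- ===== VERDICT (by name: the statement is the Claim_ definition above) =====
theorem is_unique_mapping_spec : Claim_equal_is_unique_mapping := by
  intro n a _ _
  unfold Spec_is_unique_mapping is_unique_mapping is_unique_mapping_alt
  set ps := (PySem.List.enumerate a 0).map (fun p => PySem.Int.mod (p.1 + p.2) n) with hps
  have hperm : (PySem.List.sorted ps (fun x => x) false).Perm ps := PySem.List.sorted_perm ..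
  have hpw : (PySem.List.sorted ps (fun x => x) false).Pairwise (· ≤ ·) := by
    simpa using PySem.List.sorted_pairwise ps (fun x => x)
  have hB := pvScanAdj_yes _ hpw
  rw [hperm.nodup_iff] at hB
  have hA' : pvLoopA n PySem.Set.empty (PySem.List.enumerate a 0) = "YES" ↔ ps.Nodup := by
    rw [pvLoopA_yes, ← hps]
    simp [PySem.Set.empty]
  by_cases h : ps.Nodup
  · rw [hA'.mpr h, hB.mpr h]
  · rcases pvLoopA_cases n (PySem.List.enumerate a 0) PySem.Set.empty with hy | hn
    · exact absurd (hA'.mp hy) h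
    · rcases pvScanAdj_cases (PySem.List.sorted ps (fun x => x) false) with hy2 | hn2
      · exact absurd (hB.mp hy2) h
      · rw [hn, hn2]
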